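-- pv_equiv track=rewrite | github.com/BrettRey/erdos-problem-993 | profile_condC_failures.py | check_condC
-- ===== SOURCE A (Python) =====
-- def coeff(poly, k):
--     return poly[k] if 0 <= k < len(poly) else 0
--
-- def check_condC(I_poly, E_poly):
--     """Check Condition C for (I, E). Returns True if passes."""
--     d_seq = []
--     L = max(len(I_poly), len(E_poly)) + 1
--     for k in range(L):
--         dk = coeff(I_poly, k + 1) * coeff(E_poly, k) - coeff(I_poly, k) * coeff(E_poly, k + 1)
--         d_seq.append(dk)
--     for k in range(1, L):
--         ekm1 = coeff(E_poly, k - 1)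
--         if ekm1 == 0:
--             continue
--         ek = coeff(E_poly, k)
--         ekp1 = coeff(E_poly, k + 1)
--         ikm1 = coeff(I_poly, k - 1)
--         ck = ek * ek - ekm1 * ekp1
--         val = ekm1 * d_seq[k] + ek * d_seq[k - 1] + ikm1 * ck
--         if val < 0:
--             return False
--     return True
-- ===== SOURCE B (Python) =====
-- def check_condC(I_poly, E_poly):
--     """Check Condition C for (I, E). Returns True if passes."""
--     def c(p, k):
--         return p[k] if 0 <= k < len(p) else 0
--     L = max(len(I_poly), len(E_poly)) + 1
--     # A's test value factors algebraically:
--     #   ekm1*d[k] + ek*d[k-1] + ikm1*(ek^2 - ekm1*ekp1)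
--     #     = e_{k-1} * (e_k*(i_{k+1}+i_k) - e_{k+1}*(i_k+i_{k-1})),
--     # which is 0 whenever e_{k-1} == 0, so A's 'continue' guard is subsumed.
--     return all(
--         c(E_poly, k - 1) * (c(E_poly, k) * (c(I_poly, k + 1) + c(I_poly, k))
--                             - c(E_poly, k + 1) * (c(I_poly, k) + c(I_poly, k - 1))) >= 0
--         for k in range(1, L))
-- ===== Notes on version B (the rewrite author's own statement) =====
-- stated objective: simpler
-- what changed: B algebraically factors A's test value as e_{k-1}*(e_k*(i_{k+1}+i_k) - e_{k+1}*(i_k+i_{k-1})), which eliminates the difference list d_seq, the ck term and the ekm1==0 continue (the factor makes val 0 there), reducing the whole check to one all() over k.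
import Mathlib
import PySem

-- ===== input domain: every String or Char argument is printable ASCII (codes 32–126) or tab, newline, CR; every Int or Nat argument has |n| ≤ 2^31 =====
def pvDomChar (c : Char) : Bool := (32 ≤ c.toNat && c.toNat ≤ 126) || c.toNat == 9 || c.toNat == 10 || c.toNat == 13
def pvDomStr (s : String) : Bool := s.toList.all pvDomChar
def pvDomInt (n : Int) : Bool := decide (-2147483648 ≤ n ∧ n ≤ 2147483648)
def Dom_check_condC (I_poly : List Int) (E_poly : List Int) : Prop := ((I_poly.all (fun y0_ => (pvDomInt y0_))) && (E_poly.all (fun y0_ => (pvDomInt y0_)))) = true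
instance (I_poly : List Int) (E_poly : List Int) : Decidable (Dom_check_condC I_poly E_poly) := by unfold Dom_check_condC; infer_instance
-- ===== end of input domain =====

-- B replaces A's d_seq machinery by the algebraic factorisation of its test value,
-- e_{k-1}*(e_k*(i_{k+1}+i_k) - e_{k+1}*(i_k+i_{k-1})), checked with one all() (objective: simpler).

-- ===== PORT A =====
-- coeff(poly, k): poly[k] if 0 <= k < len(poly) else 0   (all call sites pass k ≥ 0)
def coeffA (poly : List Int) (k : Nat) : Int :=
  if k < poly.length then poly.getD k 0 else 0

-- second loop of A: for k in range(1, L), with the prebuilt d_seq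
def loopA (I_poly E_poly : List Int) (d_seq : List Int) : List Nat → Bool
  | [] => true
  | k :: rest =>
    let ekm1 := coeffA E_poly (k - 1)
    if ekm1 = 0 then loopA I_poly E_poly d_seq rest
    else
      let ek := coeffA E_poly k
      let ekp1 := coeffA E_poly (k + 1)
      let ikm1 := coeffA I_poly (k - 1)
      let ck := ek * ek - ekm1 * ekp1
      let val := ekm1 * d_seq.getD k 0 + ek * d_seq.getD (k - 1) 0 + ikm1 * ck
      if val < 0 then false else loopA I_poly E_poly d_seq rest

def check_condC (I_poly : List Int) (E_poly : List Int) : Bool :=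
  let L := max I_poly.length E_poly.length + 1
  -- first loop: build d_seq by appending dk for k in range(L)
  let d_seq := (List.range L).foldl
    (fun acc k =>
      acc ++ [coeffA I_poly (k + 1) * coeffA E_poly k - coeffA I_poly k * coeffA E_poly (k + 1)]) []
  loopA I_poly E_poly d_seq (List.range' 1 (L - 1))

-- ===== PORT B =====
-- c(p, k): p[k] if 0 <= k < len(p) else 0
def coeffB (poly : List Int) (k : Nat) : Int :=
  if k < poly.length then poly.getD k 0 else 0

def check_condC_alt (I_poly : List Int) (E_poly : List Int) : Bool :=
  let L := max I_poly.length E_poly.length + 1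
  (List.range' 1 (L - 1)).all (fun k =>
    decide (0 ≤ coeffB E_poly (k - 1) *
      (coeffB E_poly k * (coeffB I_poly (k + 1) + coeffB I_poly k)
        - coeffB E_poly (k + 1) * (coeffB I_poly k + coeffB I_poly (k - 1)))))

-- ===== PRECONDITION & SPEC =====
def Spec_check_condC (I_poly : List Int) (E_poly : List Int) (out : Bool) : Prop := out = check_condC_alt I_poly E_poly
instance (I_poly : List Int) (E_poly : List Int) (out : Bool) : Decidable (Spec_check_condC I_poly E_poly out) := by unfold Spec_check_condC; infer_instance

-- ===== CLAIM (what is proved, stated in full; the proofs are below) =====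
def Claim_equal_check_condC : Prop := ∀ (I_poly : List Int) (E_poly : List Int), Dom_check_condC I_poly E_poly → Spec_check_condC I_poly E_poly (check_condC I_poly E_poly)

-- ===== LEMMAS AND PROOFS =====

-- the k-th difference of A's first loop
def dA (I_poly E_poly : List Int) (k : Nat) : Int :=
  coeffA I_poly (k + 1) * coeffA E_poly k - coeffA I_poly k * coeffA E_poly (k + 1)

-- B's factored test value
def vB (I_poly E_poly : List Int) (k : Nat) : Int :=
  coeffB E_poly (k - 1) *
    (coeffB E_poly k * (coeffB I_poly (k + 1) + coeffB I_poly k)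
      - coeffB E_poly (k + 1) * (coeffB I_poly k + coeffB I_poly (k - 1)))

theorem coeffA_eq_coeffB : coeffA = coeffB := rfl

theorem foldl_append_map (f : Nat → Int) :
    ∀ (l : List Nat) (acc : List Int),
      l.foldl (fun a k => a ++ [f k]) acc = acc ++ l.map f := by
  intro l
  induction l with
  | nil => simp
  | cons k rest ih => intro acc; simp [List.foldl, ih]

theorem coeffA_of_ge (p : List Int) (k : Nat) (h : p.length ≤ k) : coeffA p k = 0 := by
  unfold coeffA; rw [if_neg]; omega

theorem dA_of_ge (I_poly E_poly : List Int) (k : Nat)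
    (h : max I_poly.length E_poly.length + 1 ≤ k) : dA I_poly E_poly k = 0 := by
  unfold dA
  rw [coeffA_of_ge I_poly k (by omega), coeffA_of_ge E_poly k (by omega)]
  ring

-- the built d_seq agrees with dA at EVERY index (out of range both sides are 0)
theorem dseq_getD (I_poly E_poly : List Int) (k : Nat) :
    ((List.range (max I_poly.length E_poly.length + 1)).map (dA I_poly E_poly)).getD k 0
      = dA I_poly E_poly k := by
  by_cases h : k < max I_poly.length E_poly.length + 1
  · rw [List.getD_eq_getElem?_getD]
    simp [h]
  · rw [List.getD_eq_default, dA_of_ge I_poly E_poly k (by omega)]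
    simp; omega

-- the algebraic identity: A's test value equals B's, for k ≥ 1
theorem val_factor (I_poly E_poly : List Int) (k : Nat) (hk : 1 ≤ k) :
    coeffA E_poly (k - 1) * dA I_poly E_poly k
      + coeffA E_poly k * dA I_poly E_poly (k - 1)
      + coeffA I_poly (k - 1) * (coeffA E_poly k * coeffA E_poly k
          - coeffA E_poly (k - 1) * coeffA E_poly (k + 1))
      = vB I_poly E_poly k := by
  obtain ⟨m, rfl⟩ : ∃ m, k = m + 1 := ⟨k - 1, by omega⟩
  simp only [dA, vB, coeffA_eq_coeffB, Nat.add_sub_cancel]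
  ring

-- A's second loop equals B's all, over any range' 1-based tail
theorem loop_eq_all (I_poly E_poly : List Int) :
    ∀ (n a : Nat), 1 ≤ a →
      loopA I_poly E_poly
        ((List.range (max I_poly.length E_poly.length + 1)).map (dA I_poly E_poly))
        (List.range' a n)
      = (List.range' a n).all (fun k => decide (0 ≤ vB I_poly E_poly k)) := by
  intro n
  induction n with
  | zero => intro a _; rfl
  | succ m ih =>
    intro a ha
    rw [List.range'_succ, loopA, List.all_cons]
    simp only [dseq_getD]
    rw [val_factor I_poly E_poly a ha]
    by_cases he : coeffA E_poly (a - 1) = 0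
    · have hv : vB I_poly E_poly a = 0 := by
        unfold vB; rw [← coeffA_eq_coeffB, he, zero_mul]
      simp only [he, if_true, hv, le_refl, decide_true, Bool.true_and]
      exact ih (a + 1) (by omega)
    · simp only [he, if_false]
      by_cases hv : vB I_poly E_poly a < 0
      · simp only [hv, if_true]
        have : ¬ (0 ≤ vB I_poly E_poly a) := by omega
        simp [this]
      · have h0 : 0 ≤ vB I_poly E_poly a := by omega
        simp only [hv, if_false, h0, decide_true, Bool.true_and]
        exact ih (a + 1) (by omega)

-- ===== VERDICT (by name: the statement is the Claim_ definition above) =====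
theorem check_condC_spec : Claim_equal_check_condC := by
  intro I_poly E_poly _
  unfold Spec_check_condC check_condC check_condC_alt
  dsimp only
  rw [show (fun (acc : List Int) (k : Nat) =>
        acc ++ [coeffA I_poly (k + 1) * coeffA E_poly k - coeffA I_poly k * coeffA E_poly (k + 1)])
      = (fun acc k => acc ++ [dA I_poly E_poly k]) from rfl]
  rw [foldl_append_map (dA I_poly E_poly) (List.range (max I_poly.length E_poly.length + 1)) []]
  rw [List.nil_append]
  rw [loop_eq_all I_poly E_poly (max I_poly.length E_poly.length + 1 - 1) 1 le_rfl]
  rfl
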